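-- pv_equiv track=rewrite | github.com/eatingallday/graphRAG | hpg/builder.py | _smali_params_to_java
-- ===== SOURCE A (Python) =====
-- _SMALI_TO_JAVA = {
--     "V": "void", "Z": "boolean", "B": "byte", "C": "char",
--     "S": "short", "I": "int", "J": "long", "F": "float", "D": "double",
-- }
--
-- def _smali_type_to_java(t: str) -> str:
--     if t in _SMALI_TO_JAVA:
--         return _SMALI_TO_JAVA[t]
--     if t.startswith("["):
--         return _smali_type_to_java(t[1:]) + "[]"
--     if t.startswith("L") and t.endswith(";"):
--         return t[1:-1].replace("/", ".")
--     return t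
--
-- def _smali_params_to_java(params: str) -> str:
--     """Convert Smali param string to comma-separated Java types."""
--     if not params:
--         return ""
--     parts, i = [], 0
--     while i < len(params):
--         if params[i] == "[":
--             j = i + 1
--             while j < len(params) and params[j] == "[":
--                 j += 1
--             if params[j] == "L":
--                 end = params.index(";", j) + 1
--                 parts.append(_smali_type_to_java(params[i:end]))
--                 i = end
--             else:
--                 parts.append(_smali_type_to_java(params[i:j+1]))
--                 i = j + 1
--         elif params[i] == "L":
--             end = params.index(";", i) + 1
--             parts.append(_smali_type_to_java(params[i:end]))
--             i = end
--         else: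
--             parts.append(_smali_type_to_java(params[i]))
--             i += 1
--     return ",".join(parts)
-- ===== SOURCE B (Python) =====
-- _SMALI_TO_JAVA = {
--     "V": "void", "Z": "boolean", "B": "byte", "C": "char",
--     "S": "short", "I": "int", "J": "long", "F": "float", "D": "double",
-- }
--
-- def _smali_params_to_java(params: str) -> str:
--     out = []
--     i = 0
--     n = len(params)
--     while i < n:
--         dims = 0
--         while i < n and params[i] == "[":
--             dims += 1
--             i += 1
--         c = params[i]  # IndexError on a trailing '[' run, as in the original
--         if c == "L":
--             end = params.index(";", i) + 1  # ValueError if unterminated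
--             base = params[i + 1:end - 1].replace("/", ".")
--             i = end
--         elif c in _SMALI_TO_JAVA:
--             base = _SMALI_TO_JAVA[c]
--             i += 1
--         else:
--             base = c
--             i += 1
--         out.append(base + "[]" * dims)
--     return ",".join(out)
-- ===== Notes on version B (the rewrite author's own statement) =====
-- stated objective: simpler
-- what changed: Replaced the recursive _smali_type_to_java helper and the two-level bracket/class branch structure by a single flat while-loop that counts leading '[' into an integer dims, decodes the base token directly (dict lookup / class slice / pass-through), and appends base + '[]'*dims.
import Mathlib
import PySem

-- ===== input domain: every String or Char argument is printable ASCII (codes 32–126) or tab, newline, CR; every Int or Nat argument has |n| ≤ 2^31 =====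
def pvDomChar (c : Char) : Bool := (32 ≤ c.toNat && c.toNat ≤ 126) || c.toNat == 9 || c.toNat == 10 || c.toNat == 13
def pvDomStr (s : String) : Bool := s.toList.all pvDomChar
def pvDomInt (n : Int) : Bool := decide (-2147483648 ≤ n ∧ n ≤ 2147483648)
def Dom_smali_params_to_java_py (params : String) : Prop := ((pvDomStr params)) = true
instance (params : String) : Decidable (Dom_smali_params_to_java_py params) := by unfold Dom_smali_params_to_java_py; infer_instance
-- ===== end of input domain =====

-- B replaces A's recursive _smali_type_to_java helper and nested bracket branches by one
-- flat token loop (count '[' dims, decode the base token, append '[]'*dims); objective: simpler.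

-- ===== PORT A =====

-- the module-level _SMALI_TO_JAVA dict (keys are one-character strings)
def pvSmaliTbl : List (List Char × List Char) :=
  [(['V'], "void".toList), (['Z'], "boolean".toList), (['B'], "byte".toList),
   (['C'], "char".toList), (['S'], "short".toList), (['I'], "int".toList),
   (['J'], "long".toList), (['F'], "float".toList), (['D'], "double".toList)]

-- _smali_type_to_java, step for step (dict membership; '[' recursion; 'L…;' strip; pass-through)
def pvA_typeToJava (t : List Char) : List Char :=
  match List.lookup t pvSmaliTbl with
  | some j => j
  | none =>
    if _h : t.head? = some '[' then
      pvA_typeToJava (t.drop 1) ++ "[]".toList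
    else if t.head? = some 'L' ∧ t.getLast? = some ';' then
      ((t.drop 1).dropLast).map (fun c => if c = '/' then '.' else c)
    else t
termination_by t.length
decreasing_by
  cases t with
  | nil => simp at _h
  | cons a l => simp

-- params.index(';', j): split the suffix at the first ';' (none = ValueError)
def pvA_splitSemi : List Char → Option (List Char × List Char)
  | [] => none
  | c :: cs =>
    if c = ';' then some ([], cs)
    else (pvA_splitSemi cs).map (fun p => (c :: p.1, p.2))

-- the while-loop of _smali_params_to_java over the remaining suffix, accumulating parts;
-- none = the loop raised (IndexError on params[j] past the end / ValueError from index(';')).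
-- fuel (one unit per loop iteration, ≥ |cs| + 1 suffices) only makes the recursion structural.
def pvA_go (fuel : Nat) (cs : List Char) (parts : List (List Char)) :
    Option (List (List Char)) :=
  match fuel with
  | 0 => none
  | fuel + 1 =>
    match cs with
    | [] => some parts
    | c :: rest =>
      if c = '[' then                              -- params[i] == "["
        let br := rest.takeWhile (· = '[')         -- inner while: j past the run of '['
        match rest.dropWhile (· = '[') with
        | [] => none                               -- params[j] : IndexError
        | d :: tail =>
          if d = 'L' then                          -- params[j] == "L"
            match pvA_splitSemi tail with
            | none => none                         -- params.index : ValueError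
            | some (name, after) =>
              pvA_go fuel after
                (parts ++ [pvA_typeToJava ('[' :: (br ++ ('L' :: (name ++ [';']))))])
          else
            pvA_go fuel tail (parts ++ [pvA_typeToJava ('[' :: (br ++ [d]))])
      else if c = 'L' then                         -- params[i] == "L"
        match pvA_splitSemi rest with
        | none => none                             -- params.index : ValueError
        | some (name, after) =>
          pvA_go fuel after (parts ++ [pvA_typeToJava ('L' :: (name ++ [';']))])
      else
        pvA_go fuel rest (parts ++ [pvA_typeToJava [c]])

def smali_params_to_java_py (params : String) : String :=
  if params.toList = [] then ""                    -- "if not params: return ''"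
  else
    match pvA_go (params.toList.length + 1) params.toList [] with
    | some parts => String.ofList (List.intercalate [','] parts)   -- ",".join(parts)
    | none => ""                                   -- unreachable under Pre_ (the loop raised)

-- ===== PORT B =====

-- B's flat loop: count dims, decode the base token in place, append base ++ "[]"*dims
def pvBTbl : List (Char × List Char) :=
  [('V', "void".toList), ('Z', "boolean".toList), ('B', "byte".toList),
   ('C', "char".toList), ('S', "short".toList), ('I', "int".toList),
   ('J', "long".toList), ('F', "float".toList), ('D', "double".toList)]

def pvB_base (c : Char) : List Char :=
  match List.lookup c pvBTbl with                  -- c in _SMALI_TO_JAVA (one-char keys)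
  | some j => j
  | none => [c]

def pvB_go (fuel : Nat) (cs : List Char) (out : List (List Char)) :
    Option (List (List Char)) :=
  match fuel with
  | 0 => none
  | fuel + 1 =>
    match cs with
    | [] => some out                               -- while i < n
    | _ :: _ =>
      let dims := (cs.takeWhile (· = '[')).length
      match cs.dropWhile (· = '[') with
      | [] => none                                 -- params[i] : IndexError
      | c :: tail =>
        if c = 'L' then
          if ';' ∈ tail then                       -- params.index(';', i) : ValueError if absent
            let name := tail.takeWhile (· ≠ ';')
            let after := (tail.dropWhile (· ≠ ';')).drop 1
            pvB_go fuel after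
              (out ++ [(name.map (fun x => if x = '/' then '.' else x)) ++
                       (List.replicate dims "[]".toList).flatten])
          else none
        else
          pvB_go fuel tail (out ++ [pvB_base c ++ (List.replicate dims "[]".toList).flatten])

def smali_params_to_java_py_alt (params : String) : String :=
  match pvB_go (params.toList.length + 1) params.toList [] with
  | some parts => String.ofList (List.intercalate [','] parts)
  | none => ""

-- ===== PRECONDITION & SPEC =====

-- Pre_ excludes exactly the inputs on which Python A raises: a trailing run of '['
-- (IndexError on params[j]) or an 'L' class token with no terminating ';' (ValueError);
-- B raises there too.  Pre_ is the token grammar ( '['* ( 'L' [^;]* ';' | any other char ) )*,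
-- checked by a 3-state automaton: 0 = at a token boundary, 1 = inside a run of '[',
-- 2 = inside an unterminated class name.  Accept iff the string ends at a token boundary.
def pvStep (st : Nat) (c : Char) : Nat :=
  if st = 2 then (if c = ';' then 0 else 2)
  else if c = '[' then 1 else if c = 'L' then 2 else 0

def Pre_smali_params_to_java_py (params : String) : Prop := params.toList.foldl pvStep 0 = 0
instance (params : String) : Decidable (Pre_smali_params_to_java_py params) := by
  unfold Pre_smali_params_to_java_py; infer_instance

def pvWitness_smali_params_to_java_py : String := "ILjava/lang/String;[[J"

def Spec_smali_params_to_java_py (params : String) (out : String) : Prop :=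
  out = smali_params_to_java_py_alt params
instance (params : String) (out : String) : Decidable (Spec_smali_params_to_java_py params out) := by
  unfold Spec_smali_params_to_java_py; infer_instance

-- ===== CLAIM (what is proved, stated in full; the proofs are below) =====
def Claim_equal_smali_params_to_java_py : Prop :=
  ∀ (params : String), Dom_smali_params_to_java_py params →
    Pre_smali_params_to_java_py params →
    Spec_smali_params_to_java_py params (smali_params_to_java_py params)

-- ===== LEMMAS AND PROOFS =====

-- no list of length ≠ 1 is a key of the primitive table
theorem pv_lookup_nonsingle (t : List Char) (h : t.length ≠ 1) :
    List.lookup t pvSmaliTbl = none := by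
  rcases t with _ | ⟨a, _ | ⟨b, l⟩⟩
  · rfl
  · simp at h
  · simp [pvSmaliTbl, List.lookup]

-- token lemma 1: a single non-'[' non-'L' character
-- both tables answer alike on a one-character key
theorem pv_lookup_single (c : Char) :
    List.lookup [c] pvSmaliTbl = List.lookup c pvBTbl := by
  simp [pvSmaliTbl, pvBTbl, List.lookup]

theorem pv_type_single (c : Char) (hb : c ≠ '[') (hl : c ≠ 'L') :
    pvA_typeToJava [c] = pvB_base c := by
  rw [pvA_typeToJava, pvB_base, pv_lookup_single]
  cases List.lookup c pvBTbl with
  | some j => rfl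
  | none => simp [hb, hl]

-- token lemma 2: a class token 'L…;'
theorem pv_type_class (name : List Char) :
    pvA_typeToJava ('L' :: (name ++ [';'])) =
      name.map (fun c => if c = '/' then '.' else c) := by
  rw [pvA_typeToJava]
  rw [pv_lookup_nonsingle _ (by simp)]
  have hg : ('L' :: (name ++ [';'])).getLast? = some ';' := by
    rw [← List.cons_append]; exact List.getLast?_concat
  simp [hg]

-- token lemma 3: leading brackets become trailing "[]" pairs
theorem pv_type_brackets (br X : List Char) (hbr : ∀ b ∈ br, b = '[')
    (hX : X ≠ []) (hXh : X.head? ≠ some '[') :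
    pvA_typeToJava ('[' :: (br ++ X)) =
      pvA_typeToJava X ++ (List.replicate (br.length + 1) "[]".toList).flatten := by
  induction br with
  | nil =>
    rw [pvA_typeToJava]
    rw [pv_lookup_nonsingle _ (by cases X <;> simp_all)]
    simp
  | cons b br ih =>
    have hb : b = '[' := hbr b (by simp)
    subst hb
    rw [pvA_typeToJava]
    rw [pv_lookup_nonsingle _ (by simp)]
    simp only [List.head?_cons, List.cons_append, List.drop_succ_cons, List.drop_zero]
    rw [ih (fun x hx => hbr x (by simp [hx]))]
    simp [List.replicate_succ']

-- takeWhile/dropWhile of name ++ ';' :: rest with ';' ∉ name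
theorem pv_takeWhile_semi (name rest : List Char) (h : ';' ∉ name) :
    (name ++ ';' :: rest).takeWhile (· ≠ ';') = name := by
  induction name with
  | nil => rw [List.nil_append, List.takeWhile_cons_of_neg (by simp)]
  | cons c cs ih =>
    have hc : c ≠ ';' := fun e => h (by simp [e])
    have hcs : ';' ∉ cs := fun m => h (List.mem_cons_of_mem _ m)
    rw [List.cons_append, List.takeWhile_cons_of_pos (by simp [hc]), ih hcs]

theorem pv_dropWhile_semi (name rest : List Char) (h : ';' ∉ name) :
    (name ++ ';' :: rest).dropWhile (· ≠ ';') = ';' :: rest := by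
  induction name with
  | nil => rw [List.nil_append, List.dropWhile_cons_of_neg (by simp)]
  | cons c cs ih =>
    have hc : c ≠ ';' := fun e => h (by simp [e])
    have hcs : ';' ∉ cs := fun m => h (List.mem_cons_of_mem _ m)
    rw [List.cons_append, List.dropWhile_cons_of_pos (by simp [hc]), ih hcs]

-- pvA_splitSemi characterised
theorem pvA_splitSemi_none {cs : List Char} (h : pvA_splitSemi cs = none) : ';' ∉ cs := by
  induction cs with
  | nil => simp
  | cons c cs ih =>
    by_cases hc : c = ';'
    · rw [pvA_splitSemi, if_pos hc] at h; simp at h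
    · rw [pvA_splitSemi, if_neg hc] at h
      cases hm : pvA_splitSemi cs with
      | none =>
        intro hmem
        rcases List.mem_cons.mp hmem with e | m
        · exact hc e.symm
        · exact ih hm m
      | some p => rw [hm] at h; simp at h

theorem pvA_splitSemi_some {cs a b : List Char} (h : pvA_splitSemi cs = some (a, b)) :
    cs = a ++ ';' :: b ∧ ';' ∉ a := by
  induction cs generalizing a b with
  | nil => simp [pvA_splitSemi] at h
  | cons c cs ih =>
    by_cases hc : c = ';'
    · rw [pvA_splitSemi, if_pos hc] at h
      simp only [Option.some.injEq, Prod.mk.injEq] at h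
      subst hc; rw [← h.1, ← h.2]; simp
    · rw [pvA_splitSemi, if_neg hc] at h
      cases hm : pvA_splitSemi cs with
      | none => rw [hm] at h; simp at h
      | some p =>
        obtain ⟨p1, p2⟩ := p
        rw [hm] at h
        simp only [Option.map_some, Option.some.injEq, Prod.mk.injEq] at h
        obtain ⟨hp, hq⟩ := ih hm
        rw [← h.1, ← h.2]
        refine ⟨by simp [hp], ?_⟩
        intro hmem
        rcases List.mem_cons.mp hmem with e | m
        · exact hc e.symm
        · exact hq m

-- the head of a dropWhile result does not satisfy the predicate
theorem pv_dropWhile_head {p : Char → Bool} {l tail : List Char} {d : Char}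
    (h : l.dropWhile p = d :: tail) : p d = false := by
  induction l with
  | nil => simp [List.dropWhile] at h
  | cons a l ih =>
    rw [List.dropWhile_cons] at h
    by_cases hp : p a = true
    · rw [if_pos hp] at h; exact ih h
    · rw [if_neg hp] at h
      cases h
      simpa using hp

-- each iteration of A's loop appends the same part and continues on the same suffix as B's
theorem pv_go_eq : ∀ (fuel : Nat) (cs : List Char) (acc : List (List Char)),
    pvA_go fuel cs acc = pvB_go fuel cs acc := by
  intro fuel
  induction fuel with
  | zero => intro cs acc; rfl
  | succ fuel ih =>
    intro cs acc
    rcases cs with _ | ⟨c, rest⟩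
    · rfl
    · rw [pvA_go, pvB_go]
      by_cases hc : c = '['
      · subst hc
        rw [if_pos rfl]
        rw [List.takeWhile_cons_of_pos (by simp), List.dropWhile_cons_of_pos (by simp)]
        cases hdw : rest.dropWhile (· = '[') with
        | nil => rfl
        | cons d tail =>
          dsimp only
          have hd : d ≠ '[' := by simpa using pv_dropWhile_head hdw
          have hbr : ∀ b ∈ rest.takeWhile (· = '['), b = '[' := by
            intro b hb
            simpa using List.mem_takeWhile_imp hb
          by_cases hL : d = 'L'
          · subst hL
            rw [if_pos rfl, if_pos rfl]
            cases hs : pvA_splitSemi tail with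
            | none =>
              rw [if_neg (fun hmem => (pvA_splitSemi_none hs) hmem)]
            | some p =>
              obtain ⟨name, after⟩ := p
              obtain ⟨htl, hnm⟩ := pvA_splitSemi_some hs
              have hmem : ';' ∈ tail := by rw [htl]; simp
              rw [if_pos hmem]
              rw [htl, pv_takeWhile_semi _ _ hnm, pv_dropWhile_semi _ _ hnm]
              simp only [List.drop_succ_cons, List.drop_zero]
              rw [pv_type_brackets _ ('L' :: (name ++ [';'])) hbr (by simp) (by simp)]
              rw [pv_type_class]
              simp only [List.length_cons]
              exact ih after _
          · rw [if_neg hL, if_neg hL]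
            rw [pv_type_brackets _ [d] hbr (by simp) (by simpa using hd)]
            rw [pv_type_single d hd hL]
            simp only [List.length_cons]
            exact ih tail _
      · rw [if_neg hc]
        rw [List.takeWhile_cons_of_neg (by simp [hc]), List.dropWhile_cons_of_neg (by simp [hc])]
        dsimp only
        simp only [List.length_nil, List.replicate_zero, List.flatten_nil, List.append_nil]
        by_cases hL : c = 'L'
        · subst hL
          rw [if_pos rfl, if_pos rfl]
          cases hs : pvA_splitSemi rest with
          | none => rw [if_neg (fun hmem => (pvA_splitSemi_none hs) hmem)]
          | some p =>
            obtain ⟨name, after⟩ := p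
            obtain ⟨htl, hnm⟩ := pvA_splitSemi_some hs
            have hmem : ';' ∈ rest := by rw [htl]; simp
            rw [if_pos hmem]
            rw [htl, pv_takeWhile_semi _ _ hnm, pv_dropWhile_semi _ _ hnm]
            simp only [List.drop_succ_cons, List.drop_zero]
            rw [pv_type_class]
            exact ih after _
        · rw [if_neg hL, if_neg hL]
          rw [pv_type_single c hc hL]
          exact ih rest _

-- ===== VERDICT (by name: the statement is the Claim_ definition above) =====
theorem smali_params_to_java_py_spec : Claim_equal_smali_params_to_java_py := by
  intro params _ _
  unfold Spec_smali_params_to_java_py smali_params_to_java_py smali_params_to_java_py_alt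
  rw [pv_go_eq]
  by_cases h : params.toList = []
  · rw [if_pos h, h, pvB_go]
    rfl
  · rw [if_neg h]
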